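-- pv_equiv track=rewrite | github.com/aviral-bhardwaj/AI_Altryx_Converter_To_Pyspark | notebooks/ai_generator.py | _normalize_command_separators
-- ===== SOURCE A (Python) =====
-- def _normalize_command_separators(code: str) -> str:
--     """Normalize COMMAND separators to have exactly one blank line before and after."""
--     lines = code.split("\n")
--     result = []
--     i = 0
--     while i < len(lines):
--         stripped = lines[i].strip()
--         if stripped.startswith("# COMMAND"):
--             # Remove trailing blank lines before separator
--             while result and result[-1].strip() == "":
--                 result.pop()
--             result.append("")
--             result.append("# COMMAND ----------")
--             result.append("")
--             # Skip any blank lines after separator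
--             i += 1
--             while i < len(lines) and lines[i].strip() == "":
--                 i += 1
--             continue
--         result.append(lines[i])
--         i += 1
--     return "\n".join(result)
-- ===== SOURCE B (Python) =====
-- def _normalize_command_separators(code: str) -> str:
--     """Normalize COMMAND separators to have exactly one blank line before and after."""
--     SEP = "# COMMAND ----------"
--
--     def is_cmd(line):
--         return line.strip().startswith("# COMMAND")
--
--     def is_blank(line):
--         return line.strip() == ""
--
--     def lstrip_blanks(lines):
--         while lines and is_blank(lines[0]):
--             lines = lines[1:]
--         return lines
--
--     def rec(lines):
--         j = next((k for k, line in enumerate(lines) if is_cmd(line)), None)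
--         if j is None:
--             return lines
--         prefix = lstrip_blanks(lines[:j][::-1])[::-1]
--         rest = lstrip_blanks(lines[j + 1:])
--         gap = [] if rest and is_cmd(rest[0]) else [""]
--         return prefix + ["", SEP] + gap + rec(rest)
--
--     return "\n".join(rec(code.split("\n")))
-- ===== Notes on version B (the rewrite author's own statement) =====
-- stated objective: alternative
-- what changed: A's single while-loop that mutates an accumulator (popping trailing blanks back off it at each separator) is replaced by a recursion that splits the line list at the first command-separator line, strips the blank lines on each side of the split, and emits the canonical separator block between the pieces.
import Mathlib
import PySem

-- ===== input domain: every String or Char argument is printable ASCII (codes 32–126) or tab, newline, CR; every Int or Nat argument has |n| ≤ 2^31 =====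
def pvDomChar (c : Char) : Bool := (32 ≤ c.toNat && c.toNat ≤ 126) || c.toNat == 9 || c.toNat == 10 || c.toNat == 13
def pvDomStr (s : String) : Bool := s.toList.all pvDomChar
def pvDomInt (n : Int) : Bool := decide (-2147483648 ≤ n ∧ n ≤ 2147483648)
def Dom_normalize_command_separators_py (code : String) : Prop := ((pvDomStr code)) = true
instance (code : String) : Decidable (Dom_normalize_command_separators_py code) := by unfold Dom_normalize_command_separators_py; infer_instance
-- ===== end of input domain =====

-- B replaces A's single while-loop with a pop-from-the-accumulator by a recursion that splits
-- the lines at the first separator line and strips the blank lines around the split (objective: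
-- alternative decomposition, same asymptotic cost).

-- ===== PORT A =====
-- shared one-line predicates: `line.strip().startswith("# COMMAND")` and `line.strip() == ""`
def pvSepLine : String := "# COMMAND ----------"

def pvCmd (line : String) : Bool := PySem.Str.startswith (PySem.Str.strip line) "# COMMAND"

def pvBlank (line : String) : Bool := PySem.Str.strip line == ""

-- `code.split("\n")`: the separator "\n" is non-empty, so PySem.Str.split? is always `some`
def pvSplitNl (code : String) : List String := (PySem.Str.split? code "\n").getD []

-- A's inner `while result and result[-1].strip() == "": result.pop()`
def pvPopBlanks (acc : List String) : List String :=
  match h : acc.getLast? with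
  | some l => if pvBlank l then pvPopBlanks acc.dropLast else acc
  | none => acc
termination_by acc.length
decreasing_by
  cases acc with
  | nil => simp at h
  | cons a as => simp [List.length_dropLast]

-- A's `while i < len(lines)` loop; the inner `while … lines[i].strip() == "": i += 1`
-- (skip blank lines after a separator) is the dropWhile on the remaining lines.
def pvLoopA (acc : List String) (lines : List String) : List String :=
  match lines with
  | [] => acc
  | l :: ls =>
    if pvCmd l then
      pvLoopA (pvPopBlanks acc ++ ["", pvSepLine, ""]) (ls.dropWhile (fun x => pvBlank x))
    else
      pvLoopA (acc ++ [l]) ls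
termination_by lines.length
decreasing_by
  · exact Nat.lt_succ_of_le (List.length_dropWhile_le _ _)
  · simp

def normalize_command_separators_py (code : String) : String :=
  PySem.Str.join "\n" (pvLoopA [] (pvSplitNl code))

-- ===== PORT B =====
-- B's `while lines and is_blank(lines[0]): lines = lines[1:]`
def pvLstripBlanks (lines : List String) : List String :=
  match lines with
  | [] => []
  | l :: ls => if pvBlank l then pvLstripBlanks ls else l :: ls

-- used by pvRecB's termination argument
theorem pvLstripBlanks_length_le (lines : List String) :
    (pvLstripBlanks lines).length ≤ lines.length := by
  induction lines with
  | nil => simp [pvLstripBlanks]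
  | cons l ls ih => rw [pvLstripBlanks]; split <;> simp <;> omega

-- B's `rec`: split at the first separator line, strip blanks around the split, recurse on the rest
def pvRecB (lines : List String) : List String :=
  match hj : lines.findIdx? (fun l => pvCmd l) with
  | none => lines
  | some j =>
    let prefx := (pvLstripBlanks (lines.take j).reverse).reverse
    let rest := pvLstripBlanks (lines.drop (j + 1))
    let gap : List String :=
      match rest with
      | r :: _ => if pvCmd r then [] else [""]
      | [] => [""]
    prefx ++ ["", pvSepLine] ++ gap ++ pvRecB rest
termination_by lines.length
decreasing_by
  cases lines with
  | nil => simp at hj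
  | cons a as =>
    calc (pvLstripBlanks ((a :: as).drop (j + 1))).length
        ≤ ((a :: as).drop (j + 1)).length := pvLstripBlanks_length_le _
      _ < (a :: as).length := by simp [List.length_drop]

def normalize_command_separators_py_alt (code : String) : String :=
  PySem.Str.join "\n" (pvRecB (pvSplitNl code))

-- ===== PRECONDITION & SPEC =====
def Spec_normalize_command_separators_py (code : String) (out : String) : Prop := out = normalize_command_separators_py_alt code
instance (code : String) (out : String) : Decidable (Spec_normalize_command_separators_py code out) := by unfold Spec_normalize_command_separators_py; infer_instance

-- ===== CLAIM (what is proved, stated in full; the proofs are below) =====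
def Claim_equal_normalize_command_separators_py : Prop := ∀ (code : String), Dom_normalize_command_separators_py code → Spec_normalize_command_separators_py code (normalize_command_separators_py code)

-- ===== LEMMAS AND PROOFS =====

-- the functional form of A's pop loop: drop trailing blank lines
def pvPopB (l : List String) : List String := (l.reverse.dropWhile pvBlank).reverse

-- "the first non-blank line of `lines` is a COMMAND line"
def pvC (lines : List String) : Bool :=
  match lines.dropWhile pvBlank with
  | l :: _ => pvCmd l
  | [] => false

theorem pvBlank_of_not_cmd (l : String) (h : pvBlank l = true) : pvCmd l = false := by
  simp only [pvBlank, beq_iff_eq] at h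
  rw [pvCmd, h]
  decide

theorem pvBlank_false_of_cmd (l : String) (h : pvCmd l = true) : pvBlank l = false := by
  cases hb : pvBlank l
  · rfl
  · rw [pvBlank_of_not_cmd l hb] at h; simp at h

theorem pvPopB_append_single (X : List String) (l : String) :
    pvPopB (X ++ [l]) = if pvBlank l then pvPopB X else X ++ [l] := by
  simp only [pvPopB, List.reverse_append, List.reverse_cons, List.reverse_nil, List.nil_append,
    List.cons_append, List.dropWhile_cons]
  split <;> simp

theorem pvPopBlanks_eq : ∀ (n : Nat) (acc : List String), acc.length ≤ n →
    pvPopBlanks acc = pvPopB acc := by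
  intro n
  induction n with
  | zero =>
    intro acc h
    have : acc = [] := by cases acc <;> simp_all
    subst this
    rw [pvPopBlanks]
    simp [pvPopB]
  | succ n ih =>
    intro acc hlen
    rw [pvPopBlanks]
    split
    · rename_i l heq
      have hx : acc.dropLast ++ [l] = acc := List.dropLast_append_getLast? l heq
      split
      · rename_i hb
        rw [ih acc.dropLast (by simp [List.length_dropLast]; omega)]
        conv_rhs => rw [← hx]
        rw [pvPopB_append_single, if_pos hb]
      · rename_i hb
        conv_rhs => rw [← hx]
        rw [pvPopB_append_single, if_neg hb, hx]
    · rename_i heq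
      have : acc = [] := by cases acc <;> simp_all
      subst this
      simp [pvPopB]

theorem pvLstripBlanks_eq (lines : List String) :
    pvLstripBlanks lines = lines.dropWhile pvBlank := by
  induction lines with
  | nil => rfl
  | cons l ls ih => rw [pvLstripBlanks, List.dropWhile_cons]; split <;> simp_all

theorem pvPopB_eq_nil_iff (l : List String) : pvPopB l = [] ↔ ∀ x ∈ l, pvBlank x = true := by
  simp [pvPopB, List.dropWhile_eq_nil_iff]

theorem pvPopB_cons_nonblank (l : String) (t : List String) (h : pvBlank l = false) :
    pvPopB (l :: t) = l :: pvPopB t := by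
  simp only [pvPopB, List.reverse_cons, List.dropWhile_append]
  split <;> rename_i hh
  · simp only [List.isEmpty_iff] at hh
    simp [List.dropWhile_cons, h, hh]
  · simp

theorem pvPopB_cons_blank (l : String) (t : List String) (h : pvBlank l = true) :
    pvPopB (l :: t) = if pvPopB t = [] then [] else l :: pvPopB t := by
  simp only [pvPopB, List.reverse_cons, List.dropWhile_append]
  split <;> rename_i hh
  · simp only [List.isEmpty_iff] at hh
    simp [List.dropWhile_cons, h, hh, pvPopB]
  · simp only [List.isEmpty_iff] at hh
    simp [List.reverse_eq_nil_iff, hh]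

theorem pvPopB_sep_block (X : List String) :
    pvPopB (X ++ ["", pvSepLine, ""]) = X ++ ["", pvSepLine] := by
  have h1 : X ++ ["", pvSepLine, ""] = (X ++ ["", pvSepLine]) ++ [""] := by simp
  have h2 : X ++ ["", pvSepLine] = (X ++ [""]) ++ [pvSepLine] := by simp
  rw [h1, pvPopB_append_single, if_pos (by decide), h2, pvPopB_append_single,
    if_neg (by rw [show pvBlank pvSepLine = false by decide]; simp)]

-- pvRecB unfolded, with the blank-stripping helpers replaced by their functional forms
theorem pvRecB_none (lines : List String)
    (h : lines.findIdx? (fun l => pvCmd l) = none) : pvRecB lines = lines := by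
  rw [pvRecB]
  split
  · rfl
  · rename_i j heq; rw [h] at heq; exact absurd heq (by simp)

theorem pvRecB_some (lines : List String) (j : Nat)
    (h : lines.findIdx? (fun l => pvCmd l) = some j) :
    pvRecB lines =
      pvPopB (lines.take j) ++ ["", pvSepLine] ++
      (match (lines.drop (j + 1)).dropWhile pvBlank with
       | r :: _ => if pvCmd r then [] else [""]
       | [] => [""]) ++ pvRecB ((lines.drop (j + 1)).dropWhile pvBlank) := by
  rw [pvRecB]
  split
  · rename_i heq; rw [h] at heq; exact absurd heq (by simp)
  · rename_i j' heq
    rw [h] at heq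
    injection heq with heq
    subst heq
    simp only [pvLstripBlanks_eq, pvPopB]

-- with a separator at index j, pvC says exactly that everything before j is blank
theorem pvC_iff_take_blank (ls : List String) (j : Nat)
    (h : ls.findIdx? (fun l => pvCmd l) = some j) :
    pvC ls = true ↔ ∀ x ∈ ls.take j, pvBlank x = true := by
  induction ls generalizing j with
  | nil => simp at h
  | cons l t ih =>
    rw [List.findIdx?_cons] at h
    by_cases hc : pvCmd l = true
    · rw [if_pos hc] at h
      injection h with h
      subst h
      have hlb : pvBlank l = false := pvBlank_false_of_cmd l hc
      simp [pvC, List.dropWhile_cons, hlb, hc]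
    · rw [if_neg (by simp [hc])] at h
      obtain ⟨j', hj', rfl⟩ := Option.map_eq_some_iff.mp h
      cases hbl : pvBlank l with
      | false =>
        constructor
        · intro hC
          exfalso
          rw [pvC, List.dropWhile_cons, hbl] at hC
          simp [hc] at hC
        · intro hall
          have := hall l (by simp)
          rw [hbl] at this
          simp at this
      | true =>
        have hCeq : pvC (l :: t) = pvC t := by
          rw [pvC, pvC, List.dropWhile_cons, hbl]
          simp
        rw [hCeq, ih j' hj']
        constructor
        · intro hall x hx
          rcases List.mem_cons.mp (by simpa using hx) with rfl | hx'
          · exact hbl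
          · exact hall x hx'
        · intro hall x hx
          exact hall x (by simp [hx])

theorem pvC_false_of_none (ls : List String)
    (h : ls.findIdx? (fun l => pvCmd l) = none) : pvC ls = false := by
  have hall := List.findIdx?_eq_none_iff.mp h
  rw [pvC]
  cases hd : ls.dropWhile pvBlank with
  | nil => rfl
  | cons r rs =>
    exact hall r ((List.dropWhile_sublist (l := ls) (p := pvBlank)).subset
      (hd ▸ List.mem_cons_self))

theorem pvMain : ∀ (n : Nat) (lines acc : List String), lines.length ≤ n →
    pvLoopA acc lines = (if pvC lines then pvPopB acc else acc) ++ pvRecB lines := by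
  intro n
  induction n with
  | zero =>
    intro lines acc h
    have : lines = [] := by cases lines <;> simp_all
    subst this
    rw [pvLoopA, pvRecB_none _ (by simp)]
    simp [pvC]
  | succ n ih =>
    intro lines acc hlen
    cases lines with
    | nil =>
      rw [pvLoopA, pvRecB_none _ (by simp)]
      simp [pvC]
    | cons l ls =>
      rw [pvLoopA]
      by_cases hc : pvCmd l = true
      · -- separator line
        rw [if_pos hc]
        have hrest : (ls.dropWhile (fun x => pvBlank x)).length ≤ n := by
          have := List.length_dropWhile_le (fun x => pvBlank x) ls
          simp at hlen; omega
        rw [ih _ _ hrest, pvPopBlanks_eq acc.length acc le_rfl, pvPopB_sep_block]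
        have hlb : pvBlank l = false := pvBlank_false_of_cmd l hc
        have hC : pvC (l :: ls) = true := by
          rw [pvC, List.dropWhile_cons, hlb]; simpa using hc
        rw [hC, if_pos rfl]
        rw [pvRecB_some (l :: ls) 0 (by rw [List.findIdx?_cons, if_pos hc])]
        simp only [List.take_zero, List.drop_succ_cons, List.drop_zero]
        have hpe : pvPopB ([] : List String) = [] := rfl
        have hidem := List.dropWhile_idempotent (p := pvBlank) (l := ls)
        have hCrest : pvC (ls.dropWhile pvBlank) =
            (match ls.dropWhile pvBlank with
             | r :: _ => pvCmd r
             | [] => false) := by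
          rw [pvC, hidem]
        cases hd : ls.dropWhile pvBlank with
        | nil =>
          rw [pvRecB_none ([] : List String) (by simp)]
          simp [pvC, hpe]
        | cons r rs =>
          rw [hd] at hCrest
          simp only [] at hCrest
          rw [hCrest]
          cases hcr : pvCmd r
          · simp [hpe, hcr]
          · simp [hpe, hcr]
      · -- ordinary line
        rw [if_neg hc]
        have hlen' : ls.length ≤ n := by simp at hlen; omega
        rw [ih _ _ hlen']
        cases hf : ls.findIdx? (fun x => pvCmd x) with
        | none =>
          -- no separator anywhere
          have hf' : (l :: ls).findIdx? (fun x => pvCmd x) = none := by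
            rw [List.findIdx?_cons, if_neg (by simp [hc]), hf]; rfl
          rw [pvRecB_none _ hf, pvRecB_none _ hf',
            pvC_false_of_none _ hf, pvC_false_of_none _ hf']
          simp
        | some j =>
          have hf' : (l :: ls).findIdx? (fun x => pvCmd x) = some (j + 1) := by
            rw [List.findIdx?_cons, if_neg (by simp [hc]), hf]; rfl
          rw [pvRecB_some _ _ hf, pvRecB_some _ _ hf']
          simp only [List.take_succ_cons, List.drop_succ_cons]
          -- reduce to the parts before the separator
          have key : (if pvC ls = true then pvPopB (acc ++ [l]) else acc ++ [l]) ++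
                pvPopB (ls.take j)
              = (if pvC (l :: ls) = true then pvPopB acc else acc) ++
                pvPopB (l :: ls.take j) := by
            cases hbl : pvBlank l with
            | false =>
              have hCl : pvC (l :: ls) = pvCmd l := by
                rw [pvC, List.dropWhile_cons, hbl]
                simp
              have hcf : pvCmd l = false := by simp [hc]
              rw [hCl, hcf]
              rw [pvPopB_cons_nonblank l _ hbl]
              have hp : pvPopB (acc ++ [l]) = acc ++ [l] := by
                rw [pvPopB_append_single, if_neg (by simp [hbl])]
              cases hCls : pvC ls <;> simp [hp]
            | true =>
              have hCl : pvC (l :: ls) = pvC ls := by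
                rw [pvC, pvC, List.dropWhile_cons, hbl]
                simp
              rw [hCl]
              have hp : pvPopB (acc ++ [l]) = pvPopB acc := by
                rw [pvPopB_append_single, if_pos hbl]
              cases hCls : pvC ls with
              | true =>
                have htb := (pvC_iff_take_blank ls j hf).mp hCls
                have h1 : pvPopB (ls.take j) = [] := (pvPopB_eq_nil_iff _).mpr htb
                have h2 : pvPopB (l :: ls.take j) = [] := by
                  rw [pvPopB_cons_blank l _ hbl, if_pos h1]
                simp [hp, h1, h2]
              | false =>
                have htb : ¬ ∀ x ∈ ls.take j, pvBlank x = true := by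
                  intro hall
                  rw [(pvC_iff_take_blank ls j hf).mpr hall] at hCls
                  simp at hCls
                have h1 : pvPopB (ls.take j) ≠ [] := by
                  intro hnil
                  exact htb ((pvPopB_eq_nil_iff _).mp hnil)
                have h2 : pvPopB (l :: ls.take j) = l :: pvPopB (ls.take j) := by
                  rw [pvPopB_cons_blank l _ hbl, if_neg h1]
                simp [hp, h2]
          simp only [← List.append_assoc]
          rw [key]

-- ===== VERDICT (by name: the statement is the Claim_ definition above) =====
theorem normalize_command_separators_py_spec : Claim_equal_normalize_command_separators_py := by
  intro code _
  unfold Spec_normalize_command_separators_py normalize_command_separators_py normalize_command_separators_py_alt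
  congr 1
  rw [pvMain (pvSplitNl code).length _ [] le_rfl]
  have h0 : pvPopB [] = [] := rfl
  split <;> simp [h0]
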